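-- pv_equiv track=rewrite | github.com/rlagusgh0223/Algorithm | 241201/프로그래머스, 더 맵게.py | solution
-- ===== SOURCE A (Python) =====
-- import heapq
--
-- def solution(scoville, K):
--     answer = 0
--     heapq.heapify(scoville)
--     while len(scoville) > 1:
--         x = heapq.heappop(scoville)
--         # 제일 작은 값이 K 이상이어야 한다
--         if x >= K:
--             return answer
--         y = heapq.heappop(scoville)
--         heapq.heappush(scoville, x + 2*y)
--         answer += 1
--     return -1 if scoville[0]<K else answer
-- ===== SOURCE B (Python) =====
-- def solution(scoville, K):
--     pot = sorted(scoville)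
--     answer = 0
--     while len(pot) > 1:
--         if pot[0] >= K:
--             return answer
--         mix = pot[0] + 2 * pot[1]
--         rest = pot[2:]
--         k = 0
--         while k < len(rest) and rest[k] < mix:
--             k += 1
--         rest.insert(k, mix)
--         pot = rest
--         answer += 1
--     return -1 if pot[0] < K else answer
-- ===== Notes on version B (the rewrite author's own statement) =====
-- stated objective: alternative
-- what changed: Replaces the heapq min-heap with a sort-once list kept in order by a linear insertion of each mix, so the loop reads the two smallest directly at the list front; it trades A's O(n log n) heap operations for O(n) insertion scans (O(n^2) worst case, slower on large inputs). Pre_ excludes only the empty list, on which both A and B raise IndexError (scoville[0]/pot[0]).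
import Mathlib
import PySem

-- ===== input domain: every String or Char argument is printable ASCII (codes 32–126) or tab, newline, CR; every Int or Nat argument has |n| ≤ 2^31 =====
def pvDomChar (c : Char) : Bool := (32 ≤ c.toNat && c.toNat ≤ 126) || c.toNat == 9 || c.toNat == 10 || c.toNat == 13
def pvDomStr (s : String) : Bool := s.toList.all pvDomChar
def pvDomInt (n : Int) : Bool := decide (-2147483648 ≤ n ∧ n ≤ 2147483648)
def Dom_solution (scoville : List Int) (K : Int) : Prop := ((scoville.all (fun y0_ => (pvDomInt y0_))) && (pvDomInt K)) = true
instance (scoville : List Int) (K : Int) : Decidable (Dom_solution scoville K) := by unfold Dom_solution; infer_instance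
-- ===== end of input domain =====

-- B replaces the min-heap by a sort-once list kept sorted with a linear insertion per mix
-- (alternative decomposition, same return value); note A's heapify/heappop mutate the input
-- list in place while B leaves it untouched — the claim here is about the RETURN value only.

-- ===== PORT A =====
-- The heapq heap is modelled by its multiset of elements (a list): heapify is the identity
-- on the contents, heappop removes and returns the minimum, heappush appends.
def heapPopA (l : List Int) : Int × List Int :=
  match l.min? with
  | some m => (m, l.erase m)
  | none => (0, [])   -- unreachable: heappop is only called on a nonempty heap

theorem heapPopA_length (l : List Int) (h : l ≠ []) :
    (heapPopA l).2.length = l.length - 1 := by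
  match hm : l.min? with
  | some m =>
    simp only [heapPopA, hm]
    exact List.length_erase_of_mem ((List.min?_eq_some_iff.mp hm).1)
  | none => exact absurd (List.min?_eq_none_iff.mp hm) h

-- while len(scoville) > 1: …
def solLoopA (l : List Int) (K answer : Int) : Int :=
  if h : 1 < l.length then
    let x := (heapPopA l).1
    let l1 := (heapPopA l).2
    if x ≥ K then answer
    else
      let y := (heapPopA l1).1
      let l2 := (heapPopA l1).2
      solLoopA (l2 ++ [x + 2 * y]) K (answer + 1)
  else
    match l with
    | [] => 0   -- scoville[0] raises IndexError in Python; excluded by Pre_solution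
    | a :: _ => if a < K then -1 else answer
termination_by l.length
decreasing_by
  have h0 : l ≠ [] := by intro e; subst e; simp at h
  have e1 : (heapPopA l).2.length = l.length - 1 := heapPopA_length l h0
  have h1 : (heapPopA l).2 ≠ [] := by
    intro e; rw [e] at e1; simp at e1; omega
  have e2 : ((heapPopA (heapPopA l).2).2).length = (heapPopA l).2.length - 1 :=
    heapPopA_length _ h1
  simp only [List.length_append, List.length_cons, List.length_nil]
  omega

def solution (scoville : List Int) (K : Int) : Int :=
  solLoopA scoville K 0

-- ===== PORT B =====
-- linear insertion of mix into the sorted rest (the inner while loop of Source B)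
def insertSorted (x : Int) : List Int → List Int
  | [] => [x]
  | a :: t => if a < x then a :: insertSorted x t else x :: a :: t

theorem insertSorted_length (x : Int) (l : List Int) :
    (insertSorted x l).length = l.length + 1 := by
  induction l with
  | nil => rfl
  | cons a t ih => simp only [insertSorted]; split <;> simp [ih]

def solLoopB (pot : List Int) (K answer : Int) : Int :=
  match pot with
  | a :: b :: rest =>
    if a ≥ K then answer
    else solLoopB (insertSorted (a + 2 * b) rest) K (answer + 1)
  | [a] => if a < K then -1 else answer
  | [] => 0   -- pot[0] raises IndexError in Python; excluded by Pre_solution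
termination_by pot.length
decreasing_by simp [insertSorted_length]

def solution_alt (scoville : List Int) (K : Int) : Int :=
  solLoopB (PySem.List.sorted scoville (fun x => x) false) K 0

-- ===== PRECONDITION & SPEC =====
-- Pre_ excludes only the empty list, on which both Pythons raise IndexError (scoville[0]).
def Pre_solution (scoville : List Int) (K : Int) : Prop := scoville ≠ []
instance (scoville : List Int) (K : Int) : Decidable (Pre_solution scoville K) := by
  unfold Pre_solution; infer_instance
def pvWitness_solution : List Int × Int := ([1, 2, 3, 9, 10, 12], 7)

def Spec_solution (scoville : List Int) (K : Int) (out : Int) : Prop := out = solution_alt scoville K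
instance (scoville : List Int) (K : Int) (out : Int) : Decidable (Spec_solution scoville K out) := by unfold Spec_solution; infer_instance

-- ===== CLAIM (what is proved, stated in full; the proofs are below) =====
def Claim_equal_solution : Prop := ∀ (scoville : List Int) (K : Int), Dom_solution scoville K → Pre_solution scoville K → Spec_solution scoville K (solution scoville K)

-- ===== LEMMAS AND PROOFS =====

theorem insertSorted_perm (x : Int) (l : List Int) :
    (insertSorted x l).Perm (x :: l) := by
  induction l with
  | nil => exact List.Perm.refl _
  | cons a t ih =>
    simp only [insertSorted]
    split
    · exact (ih.cons a).trans (List.Perm.swap x a t)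
    · exact List.Perm.refl _

theorem insertSorted_pairwise (x : Int) (l : List Int)
    (h : l.Pairwise (· ≤ ·)) : (insertSorted x l).Pairwise (· ≤ ·) := by
  induction l with
  | nil => simp [insertSorted]
  | cons a t ih =>
    rcases List.pairwise_cons.mp h with ⟨ha, ht⟩
    simp only [insertSorted]
    split
    · rename_i hax
      refine List.pairwise_cons.mpr ⟨?_, ih ht⟩
      intro b hb
      rcases List.mem_cons.mp ((insertSorted_perm x t).mem_iff.mp hb) with hb | hb
      · subst hb; exact le_of_lt hax
      · exact ha b hb
    · rename_i hax
      refine List.pairwise_cons.mpr ⟨?_, h⟩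
      intro b hb
      rcases List.mem_cons.mp hb with hb | hb
      · subst hb; omega
      · exact le_trans (by omega) (ha b hb)

-- head of a sorted rearrangement is the minimum
theorem min?_of_perm_sorted (l t : List Int) (a : Int)
    (hperm : l.Perm (a :: t)) (hsort : (a :: t).Pairwise (· ≤ ·)) :
    l.min? = some a := by
  apply List.min?_eq_some_iff.mpr
  constructor
  · exact hperm.mem_iff.mpr (List.mem_cons_self)
  · intro b hb
    rcases List.mem_cons.mp (hperm.mem_iff.mp hb) with hb | hb
    · omega
    · exact (List.pairwise_cons.mp hsort).1 b hb

theorem loop_eq (n : Nat) (l pot : List Int) (K ans : Int)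
    (hn : l.length = n) (hperm : l.Perm pot) (hsort : pot.Pairwise (· ≤ ·)) :
    solLoopA l K ans = solLoopB pot K ans := by
  induction n using Nat.strong_induction_on generalizing l pot K ans with
  | _ n ih =>
    match pot with
    | [] =>
      have : l = [] := hperm.eq_nil
      subst this
      rw [solLoopA, solLoopB]; simp
    | [a] =>
      have : l = [a] := List.perm_singleton.mp hperm
      subst this
      rw [solLoopA, solLoopB]; simp
    | a :: b :: rest =>
      have hlen : l.length = rest.length + 2 := by simpa using hperm.length_eq
      have h1 : 1 < l.length := by omega
      have hmin : l.min? = some a :=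
        min?_of_perm_sorted l (b :: rest) a hperm hsort
      have hp1 : heapPopA l = (a, l.erase a) := by simp [heapPopA, hmin]
      have hperm1 : (l.erase a).Perm (b :: rest) := by
        have := hperm.erase a
        simpa using this
      have hmin1 : (l.erase a).min? = some b :=
        min?_of_perm_sorted _ rest b hperm1 (List.Pairwise.of_cons hsort)
      have hp2 : heapPopA (l.erase a) = (b, (l.erase a).erase b) := by
        simp [heapPopA, hmin1]
      rw [solLoopA, solLoopB]
      rw [dif_pos h1]
      simp only [hp1, hp2]
      by_cases hK : a ≥ K
      · rw [if_pos hK, if_pos hK]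
      · rw [if_neg hK, if_neg hK]
        have hperm2 : ((l.erase a).erase b).Perm rest := by
          have := hperm1.erase b
          simpa using this
        have hlen2 : ((l.erase a).erase b ++ [a + 2 * b]).length = rest.length + 1 := by
          simpa using hperm2.length_eq
        apply ih (rest.length + 1) (by omega) _ _ _ _ hlen2
        · exact ((List.perm_append_singleton _ _).trans (hperm2.cons _)).trans
            (insertSorted_perm _ _).symm
        · exact insertSorted_pairwise _ _ (List.Pairwise.of_cons (List.Pairwise.of_cons hsort))

-- ===== VERDICT (by name: the statement is the Claim_ definition above) =====
theorem solution_spec : Claim_equal_solution := by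
  intro scoville K _ _
  unfold Spec_solution solution solution_alt
  refine loop_eq scoville.length scoville _ K 0 rfl ?_ ?_
  · exact (PySem.List.sorted_perm ..).symm
  · have := PySem.List.sorted_pairwise (xs := scoville) (key := fun x => x)
    simpa using this
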